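-- pv_equiv track=rewrite | github.com/hwbrent/advent-of-code | 2024/python/day2.py | parse_raw_input
-- ===== SOURCE A (Python) =====
-- import itertools as it
--
-- def parse_raw_input(input: str) -> tuple[list, list, int]:
--     """
--     Returns a tuple with the following values
--     1. `list` of `list` of `int`s - the "reports" from the input
--     2. `list` of `bool`s - whether each report in (1) is "safe"
--     3. `int` - the number of reports from (1) which are safe
--
--     We can tolerate a single bad level. So if there's one level which isn't
--     in the acceptable range or causes the levels to not be all increasing
--     or decreasing, we can remove that level and reevaluate
--
--     Workflow:
--     1. Evaluate initial report
--     2. If the initial report is safe, continue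
--     3. Else, check which values are out of range, and which are causing the
--        levels to not solely in/decrease
--     4. If there's only offending level, remove it, and reevaluate the report
--     """
--     reports = []
--     safeties = []
--     safe_count = 0
--
--     lines = input.strip().split("\n")
--     for report in lines:
--         # Get list of ints
--         report = report.split()
--         report = [int(level) for level in report]
--         reports.append(report)
--
--         # Do pairwise subtraction to figure out the differences between each
--         # pair of "levels" in the report
--         pairs = it.pairwise(report)
--         diffs = [b - a for a, b in pairs]
--         diff_count = len(diffs)
--
--         # Figure out if all the differences are either increasing or
--         # decreasing
--         increasing = [d > 0 for d in diffs]
--         decreasing = [d < 0 for d in diffs]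
--         all_increasing = increasing.count(True) == diff_count
--         all_decreasing = decreasing.count(True) == diff_count
--         all_increasing_or_decreasing = all_increasing or all_decreasing
--
--         # Figure out if each difference is within the acceptable range
--         # between 1 and 3
--         diffs_in_range = all(1 <= abs(diff) <= 3 for diff in diffs)
--
--         # Using the two bools, figure out if the report is "safe"
--         # If initially safe, keep looping
--         safe = all_increasing_or_decreasing and diffs_in_range
--         if safe:
--             safeties.append(safe)
--             safe_count += 1
--             continue
--
--     return reports, safeties, safe_count
-- ===== SOURCE B (Python) =====
-- def parse_raw_input(input: str) -> tuple[list, list, int]: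
--     reports = []
--     safeties = []
--     safe_count = 0
--     for line in input.strip().split("\n"):
--         report = [int(level) for level in line.split()]
--         reports.append(report)
--         # Decide safety from the RANGE of consecutive differences: one scalar
--         # pass tracking only the min and max diff (no diff/flag lists, no
--         # count/all checks): safe iff that range fits in [1,3] or [-3,-1].
--         if len(report) < 2:
--             safe = True
--         else:
--             mn = mx = report[1] - report[0]
--             prev = report[1]
--             for x in report[2:]:
--                 d = x - prev
--                 mn = min(mn, d)
--                 mx = max(mx, d)
--                 prev = x
--             safe = (1 <= mn and mx <= 3) or (-3 <= mn and mx <= -1)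
--         if safe:
--             safeties.append(True)
--             safe_count += 1
--     return reports, safeties, safe_count
-- ===== Notes on version B (the rewrite author's own statement) =====
-- stated objective: alternative
-- what changed: Safety is decided from the extrema of the consecutive differences, maintained as two scalars (min, max) in one fold, instead of materializing diff/increasing/decreasing lists and comparing count(True) to the length plus a separate all() abs-range check; safe iff the whole diff range fits in [1,3] or in [-3,-1].
import Mathlib
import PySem

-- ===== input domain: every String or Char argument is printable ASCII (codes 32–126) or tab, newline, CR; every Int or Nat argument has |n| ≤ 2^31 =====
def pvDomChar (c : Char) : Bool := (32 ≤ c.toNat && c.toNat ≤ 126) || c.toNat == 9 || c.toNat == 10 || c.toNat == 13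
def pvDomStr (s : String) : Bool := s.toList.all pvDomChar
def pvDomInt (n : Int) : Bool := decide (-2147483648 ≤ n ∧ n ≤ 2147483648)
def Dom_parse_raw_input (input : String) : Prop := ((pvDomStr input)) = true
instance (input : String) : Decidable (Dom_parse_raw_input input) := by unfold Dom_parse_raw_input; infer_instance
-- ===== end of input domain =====

-- B decides each report's safety from the extrema (min/max) of the consecutive
-- differences, kept as two scalars in one pass, instead of A's diff/increasing/
-- decreasing lists with count(True) comparisons and an all() abs-range check;
-- objective: alternative. Return-value equivalence only.

-- ===== PORT A =====
-- shared line parser: line.split() then [int(t) for t in …]; getD 0 is unreachable under Pre_ (Python raises ValueError there)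
def pvParseLine (line : String) : List Int :=
  (PySem.Str.split₀ line).map (fun t => (PySem.Int.ofStr? t).getD 0)

def parse_raw_input (input : String) : List (List Int) × List Bool × Int :=
  let lines := (PySem.Str.split? (PySem.Str.strip input) "\n").getD []
  lines.foldl
    (fun (st : List (List Int) × List Bool × Int) line =>
      let report := pvParseLine line
      let reports := st.1 ++ [report]
      let diffs := (report.zip report.tail).map (fun p => p.2 - p.1)
      let diff_count := diffs.length
      let increasing := diffs.map (fun d => decide (0 < d))
      let decreasing := diffs.map (fun d => decide (d < 0))
      let all_increasing := increasing.count true == diff_count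
      let all_decreasing := decreasing.count true == diff_count
      let all_increasing_or_decreasing := all_increasing || all_decreasing
      let diffs_in_range := diffs.all (fun d => decide (1 ≤ |d|) && decide (|d| ≤ 3))
      let safe := all_increasing_or_decreasing && diffs_in_range
      if safe then (reports, st.2.1 ++ [safe], st.2.2 + 1) else (reports, st.2.1, st.2.2))
    ([], [], 0)

-- ===== PORT B =====
-- per-report safety: one scalar pass over report[2:] tracking (min diff, max diff, prev)
def pvSafeB (report : List Int) : Bool :=
  match report with
  | a :: b :: rest =>
      let st := rest.foldl
        (fun (s : Int × Int × Int) x => (min s.1 (x - s.2.2), max s.2.1 (x - s.2.2), x))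
        (b - a, b - a, b)
      (decide (1 ≤ st.1) && decide (st.2.1 ≤ 3)) || (decide (-3 ≤ st.1) && decide (st.2.1 ≤ -1))
  | _ => true   -- len(report) < 2

def parse_raw_input_alt (input : String) : List (List Int) × List Bool × Int :=
  let lines := (PySem.Str.split? (PySem.Str.strip input) "\n").getD []
  lines.foldl
    (fun (st : List (List Int) × List Bool × Int) line =>
      let report := pvParseLine line
      if pvSafeB report then (st.1 ++ [report], st.2.1 ++ [true], st.2.2 + 1)
      else (st.1 ++ [report], st.2.1, st.2.2))
    ([], [], 0)

-- ===== PRECONDITION & SPEC =====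
-- Pre_: every whitespace-separated token of every line of the stripped input parses as a Python int
-- (otherwise A raises ValueError at int(level)).
def Pre_parse_raw_input (input : String) : Prop :=
  ∀ line ∈ (PySem.Str.split? (PySem.Str.strip input) "\n").getD [],
    ∀ t ∈ PySem.Str.split₀ line, (PySem.Int.ofStr? t).isSome = true
instance (input : String) : Decidable (Pre_parse_raw_input input) := by
  unfold Pre_parse_raw_input; infer_instance

def pvWitness_parse_raw_input : String := "1 2 4\n8 6 4 1\n5 5"

def Spec_parse_raw_input (input : String) (out : List (List Int) × List Bool × Int) : Prop := out = parse_raw_input_alt input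
instance (input : String) (out : List (List Int) × List Bool × Int) : Decidable (Spec_parse_raw_input input out) := by unfold Spec_parse_raw_input; infer_instance

-- ===== CLAIM (what is proved, stated in full; the proofs are below) =====
def Claim_equal_parse_raw_input : Prop := ∀ (input : String), Dom_parse_raw_input input → Pre_parse_raw_input input → Spec_parse_raw_input input (parse_raw_input input)

-- ===== LEMMAS AND PROOFS =====

-- a mapped count of True equals the length iff the predicate holds everywhere
theorem pv_count_all {α : Type} (p : α → Bool) (l : List α) :
    (List.count true (l.map p) = l.length) ↔ ∀ x ∈ l, p x = true := by
  rw [show l.length = (l.map p).length by simp, List.count_eq_length]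
  constructor
  · intro h x hx; exact (h _ (List.mem_map_of_mem hx)).symm
  · intro h b hb
    rcases List.mem_map.mp hb with ⟨x, hx, rfl⟩
    exact (h x hx).symm

-- the scalar fold computes bounds for all consecutive diffs of b::xs
theorem pv_fold_bound (xs : List Int) : ∀ (mn mx b c C : Int),
    (c ≤ (xs.foldl (fun (s : Int × Int × Int) x => (min s.1 (x - s.2.2), max s.2.1 (x - s.2.2), x)) (mn, mx, b)).1
      ∧ (xs.foldl (fun (s : Int × Int × Int) x => (min s.1 (x - s.2.2), max s.2.1 (x - s.2.2), x)) (mn, mx, b)).2.1 ≤ C)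
    ↔ (c ≤ mn ∧ mx ≤ C ∧ ∀ p ∈ (b :: xs).zip xs, c ≤ p.2 - p.1 ∧ p.2 - p.1 ≤ C) := by
  induction xs with
  | nil => intro mn mx b c C; simp
  | cons x rest ih =>
    intro mn mx b c C
    simp only [List.foldl_cons, ih, List.zip_cons_cons, List.forall_mem_cons,
      le_min_iff, max_le_iff]
    tauto

-- per-report: A's safety boolean equals B's min/max-based one
theorem pv_safe_eq (report : List Int) :
    (((((report.zip report.tail).map (fun p => p.2 - p.1)).map (fun d => decide (0 < d))).count true
        == ((report.zip report.tail).map (fun p => p.2 - p.1)).length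
      || (((report.zip report.tail).map (fun p => p.2 - p.1)).map (fun d => decide (d < 0))).count true
        == ((report.zip report.tail).map (fun p => p.2 - p.1)).length)
    && ((report.zip report.tail).map (fun p => p.2 - p.1)).all (fun d => decide (1 ≤ |d|) && decide (|d| ≤ 3)))
    = pvSafeB report := by
  match report with
  | [] => decide
  | [a] => simp [pvSafeB]
  | a :: b :: rest =>
    rw [Bool.eq_iff_iff]
    simp only [pvSafeB, Bool.or_eq_true, Bool.and_eq_true, decide_eq_true_eq,
      pv_fold_bound, beq_iff_eq, List.length_map, List.map_map, pv_count_all,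
      List.all_map, List.all_eq_true, Function.comp, List.tail_cons,
      List.zip_cons_cons, List.forall_mem_cons]
    constructor
    · rintro ⟨h | h, hr⟩
      · left
        refine ⟨?_, ?_, fun p hp => ?_⟩
        · have h1 := h.1; have h2 := hr.1
          rcases abs_cases (b - a) with ⟨e1, e2⟩ | ⟨e1, e2⟩ <;> simp at h1 <;> omega
        · have h1 := h.1; have h2 := hr.1
          rcases abs_cases (b - a) with ⟨e1, e2⟩ | ⟨e1, e2⟩ <;> simp at h1 <;> omega
        · have h1 := h.2 p hp; have h2 := hr.2 p hp
          rcases abs_cases (p.2 - p.1) with ⟨e1, e2⟩ | ⟨e1, e2⟩ <;> simp at h1 <;> omega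
      · right
        refine ⟨?_, ?_, fun p hp => ?_⟩
        · have h1 := h.1; have h2 := hr.1
          rcases abs_cases (b - a) with ⟨e1, e2⟩ | ⟨e1, e2⟩ <;> simp at h1 <;> omega
        · have h1 := h.1; have h2 := hr.1
          rcases abs_cases (b - a) with ⟨e1, e2⟩ | ⟨e1, e2⟩ <;> simp at h1 <;> omega
        · have h1 := h.2 p hp; have h2 := hr.2 p hp
          rcases abs_cases (p.2 - p.1) with ⟨e1, e2⟩ | ⟨e1, e2⟩ <;> simp at h1 <;> omega
    · rintro (⟨h0, h3, h⟩ | ⟨h0, h3, h⟩)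
      · refine ⟨Or.inl ⟨by omega, fun p hp => by have := h p hp; omega⟩,
          ⟨?_, fun p hp => ?_⟩⟩
        · rcases abs_cases (b - a) with ⟨e1, e2⟩ | ⟨e1, e2⟩ <;> omega
        · have := h p hp
          rcases abs_cases (p.2 - p.1) with ⟨e1, e2⟩ | ⟨e1, e2⟩ <;> omega
      · refine ⟨Or.inr ⟨by omega, fun p hp => by have := h p hp; omega⟩,
          ⟨?_, fun p hp => ?_⟩⟩
        · rcases abs_cases (b - a) with ⟨e1, e2⟩ | ⟨e1, e2⟩ <;> omega
        · have := h p hp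
          rcases abs_cases (p.2 - p.1) with ⟨e1, e2⟩ | ⟨e1, e2⟩ <;> omega

-- the two per-line step functions are extensionally equal
theorem pv_step_eq :
    (fun (st : List (List Int) × List Bool × Int) line =>
      let report := pvParseLine line
      let reports := st.1 ++ [report]
      let diffs := (report.zip report.tail).map (fun p => p.2 - p.1)
      let diff_count := diffs.length
      let increasing := diffs.map (fun d => decide (0 < d))
      let decreasing := diffs.map (fun d => decide (d < 0))
      let all_increasing := increasing.count true == diff_count
      let all_decreasing := decreasing.count true == diff_count
      let all_increasing_or_decreasing := all_increasing || all_decreasing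
      let diffs_in_range := diffs.all (fun d => decide (1 ≤ |d|) && decide (|d| ≤ 3))
      let safe := all_increasing_or_decreasing && diffs_in_range
      if safe then (reports, st.2.1 ++ [safe], st.2.2 + 1) else (reports, st.2.1, st.2.2))
    = (fun (st : List (List Int) × List Bool × Int) line =>
      let report := pvParseLine line
      if pvSafeB report then (st.1 ++ [report], st.2.1 ++ [true], st.2.2 + 1)
      else (st.1 ++ [report], st.2.1, st.2.2)) := by
  funext st line
  simp only
  rw [pv_safe_eq (pvParseLine line)]
  by_cases h : pvSafeB (pvParseLine line) <;> simp [h]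

-- ===== VERDICT (by name: the statement is the Claim_ definition above) =====
theorem parse_raw_input_spec : Claim_equal_parse_raw_input := by
  intro input _ _
  unfold Spec_parse_raw_input parse_raw_input parse_raw_input_alt
  rw [pv_step_eq]
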